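-- pv_equiv track=rewrite | github.com/spacegraphcats/spacegraphcats | spacegraphcats/search/search_utils.py | calc_node_shadow_sizes
-- ===== SOURCE A (Python) =====
-- def calc_node_shadow_sizes(dag, dag_levels, layer1_to_cdbg):
--     x = []
--     for (node_id, level) in dag_levels.items():
--         x.append((level, node_id))
--     x.sort()
--
--     node_shadow_sizes = {}
--     for level, node_id in x:
--         if level == 0:
--             node_shadow_sizes[node_id] = len(layer1_to_cdbg[node_id])
--         else:
--             sub_size = 0
--             for child_id in dag[node_id]:
--                 sub_size += node_shadow_sizes[child_id]
--             node_shadow_sizes[node_id] = sub_size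
--
--     return node_shadow_sizes
-- ===== SOURCE B (Python) =====
-- def calc_node_shadow_sizes(dag, dag_levels, layer1_to_cdbg):
--     memo = {}
--
--     def shadow(n):
--         if n in memo:
--             return memo[n]
--         if dag_levels[n] == 0:
--             v = len(layer1_to_cdbg[n])
--         else:
--             v = 0
--             for c in dag[n]:
--                 v += shadow(c)
--         memo[n] = v
--         return v
--
--     result = {}
--     for n in sorted(dag_levels, key=lambda m: (dag_levels[m], m)):
--         result[n] = shadow(n)
--     return result
-- ===== Notes on version B (the rewrite author's own statement) =====
-- stated objective: alternative
-- what changed: Replaces the level-sorted bottom-up DP (which relies on processing order for correctness) with a memoized recursive shadow() that descends the DAG on demand; a key sort is kept only to reproduce the output dict's key order.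
import Mathlib
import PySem

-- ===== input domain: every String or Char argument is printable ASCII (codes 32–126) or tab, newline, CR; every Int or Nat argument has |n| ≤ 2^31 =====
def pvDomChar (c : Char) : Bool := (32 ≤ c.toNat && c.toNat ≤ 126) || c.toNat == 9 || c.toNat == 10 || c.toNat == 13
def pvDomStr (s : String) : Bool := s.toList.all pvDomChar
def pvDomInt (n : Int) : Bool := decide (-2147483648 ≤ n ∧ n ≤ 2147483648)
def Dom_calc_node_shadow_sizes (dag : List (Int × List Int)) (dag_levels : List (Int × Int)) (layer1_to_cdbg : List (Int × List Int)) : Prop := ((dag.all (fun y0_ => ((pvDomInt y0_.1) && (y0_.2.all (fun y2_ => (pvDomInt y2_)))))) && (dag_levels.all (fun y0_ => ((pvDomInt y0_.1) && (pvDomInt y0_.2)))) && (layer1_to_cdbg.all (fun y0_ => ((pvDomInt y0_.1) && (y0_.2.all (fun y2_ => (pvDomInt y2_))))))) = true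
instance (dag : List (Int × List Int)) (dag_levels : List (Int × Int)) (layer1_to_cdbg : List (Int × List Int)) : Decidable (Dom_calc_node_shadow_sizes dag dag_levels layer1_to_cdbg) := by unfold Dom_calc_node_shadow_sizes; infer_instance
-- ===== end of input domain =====

-- B replaces A's level-sorted bottom-up DP with a memoized recursive shadow() that descends the DAG
-- on demand (the key sort is kept only for the output dict's key order); same cost, different structure.

-- ===== PORT A =====
-- Python A: build x = [(level, node_id)], x.sort() (lexicographic tuple sort = sorted2 on the two
-- components), then fill node_shadow_sizes in that order.  The two dict subscripts
-- layer1_to_cdbg[node_id] / dag[node_id] and node_shadow_sizes[child_id] raise KeyError in Python;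
-- Pre_ excludes exactly those inputs, the port reads a default there (unreachable under Pre_).
def calc_node_shadow_sizes (dag : List (Int × List Int)) (dag_levels : List (Int × Int)) (layer1_to_cdbg : List (Int × List Int)) : List (Int × Int) :=
  let x := PySem.List.sorted2 (dag_levels.map (fun p => (p.2, p.1))) (fun t => t.1) (fun t => t.2)
  let nss := x.foldl (fun (d : PySem.Dict Int Int) t =>
      if t.1 == 0 then
        d.insert t.2 (((PySem.Dict.mk layer1_to_cdbg).getD t.2 []).length : Int)
      else
        d.insert t.2 (((PySem.Dict.mk dag).getD t.2 []).foldl (fun s c => s + d.getD c 0) 0))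
    PySem.Dict.empty
  nss.items

-- ===== PORT B =====
-- helper for B: shadow(n) with memo dict threaded through; fuel only makes the Python recursion
-- structural (under Pre_ the recursion depth is < |dag_levels| + 1, so fuel never runs out).
def pvShadow (dag : List (Int × List Int)) (dag_levels : List (Int × Int)) (layer1_to_cdbg : List (Int × List Int)) : Nat → PySem.Dict Int Int → Int → Int × PySem.Dict Int Int
  | 0, memo, _ => (0, memo)
  | fuel+1, memo, n =>
    match PySem.Dict.get? memo n with
    | some v => (v, memo)
    | none =>
      if (PySem.Dict.mk dag_levels).getD n 0 == 0 then
        let v : Int := (((PySem.Dict.mk layer1_to_cdbg).getD n []).length : Int)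
        (v, memo.insert n v)
      else
        let r := ((PySem.Dict.mk dag).getD n []).foldl
          (fun (acc : Int × PySem.Dict Int Int) c =>
            let rc := pvShadow dag dag_levels layer1_to_cdbg fuel acc.2 c
            (acc.1 + rc.1, rc.2)) (0, memo)
        (r.1, r.2.insert n r.1)

def calc_node_shadow_sizes_alt (dag : List (Int × List Int)) (dag_levels : List (Int × Int)) (layer1_to_cdbg : List (Int × List Int)) : List (Int × Int) :=
  let ks := PySem.List.sorted2 (dag_levels.map (fun p => p.1))
      (fun n => (PySem.Dict.mk dag_levels).getD n 0) (fun n => n)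
  let r := ks.foldl (fun (st : PySem.Dict Int Int × PySem.Dict Int Int) n =>
      let rc := pvShadow dag dag_levels layer1_to_cdbg (dag_levels.length + 1) st.2 n
      (st.1.insert n rc.1, rc.2)) (PySem.Dict.empty, PySem.Dict.empty)
  r.1.items

-- ===== PRECONDITION & SPEC =====
-- Pre_: dag_levels is a dict (unique keys), every level-0 node has a layer1_to_cdbg entry, and every
-- other node has a dag entry all of whose children occur in dag_levels strictly earlier in the
-- (level, node_id) order — exactly the inputs on which Python A returns instead of raising KeyError.
def Pre_calc_node_shadow_sizes (dag : List (Int × List Int)) (dag_levels : List (Int × Int)) (layer1_to_cdbg : List (Int × List Int)) : Prop :=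
  (dag_levels.map (fun p => p.1)).Nodup ∧
  ∀ p ∈ dag_levels,
    (p.2 = 0 → p.1 ∈ layer1_to_cdbg.map (fun q => q.1)) ∧
    (p.2 ≠ 0 → (PySem.Dict.mk dag).contains p.1 = true ∧
      ∀ c ∈ (PySem.Dict.mk dag).getD p.1 [],
        ∃ r ∈ dag_levels, r.1 = c ∧ (r.2 < p.2 ∨ (r.2 = p.2 ∧ c < p.1)))
instance (dag : List (Int × List Int)) (dag_levels : List (Int × Int)) (layer1_to_cdbg : List (Int × List Int)) : Decidable (Pre_calc_node_shadow_sizes dag dag_levels layer1_to_cdbg) := by unfold Pre_calc_node_shadow_sizes; infer_instance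

def pvWitness_calc_node_shadow_sizes : (List (Int × List Int)) × (List (Int × Int)) × (List (Int × List Int)) :=
  ([(2, [1, 1])], [(1, 0), (2, 1)], [(1, [5, 7, 9])])

def Spec_calc_node_shadow_sizes (dag : List (Int × List Int)) (dag_levels : List (Int × Int)) (layer1_to_cdbg : List (Int × List Int)) (out : List (Int × Int)) : Prop := out = calc_node_shadow_sizes_alt dag dag_levels layer1_to_cdbg
instance (dag : List (Int × List Int)) (dag_levels : List (Int × Int)) (layer1_to_cdbg : List (Int × List Int)) (out : List (Int × Int)) : Decidable (Spec_calc_node_shadow_sizes dag dag_levels layer1_to_cdbg out) := by unfold Spec_calc_node_shadow_sizes; infer_instance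

-- ===== CLAIM (what is proved, stated in full; the proofs are below) =====
def Claim_equal_calc_node_shadow_sizes : Prop := ∀ (dag : List (Int × List Int)) (dag_levels : List (Int × Int)) (layer1_to_cdbg : List (Int × List Int)), Dom_calc_node_shadow_sizes dag dag_levels layer1_to_cdbg → Pre_calc_node_shadow_sizes dag dag_levels layer1_to_cdbg → Spec_calc_node_shadow_sizes dag dag_levels layer1_to_cdbg (calc_node_shadow_sizes dag dag_levels layer1_to_cdbg)

-- ===== LEMMAS AND PROOFS =====

-- the (level, node_id) key of a node, the lexicographic order A's sort realises, and a node's rank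
def pvKey (dag_levels : List (Int × Int)) (n : Int) : Int × Int := ((PySem.Dict.mk dag_levels).getD n 0, n)
def pvLexlt (a b : Int × Int) : Bool := a.1 < b.1 || (a.1 == b.1 && a.2 < b.2)
def pvLexle (a b : Int × Int) : Bool := a.1 < b.1 || (a.1 == b.1 && a.2 ≤ b.2)
def pvRank (dag_levels : List (Int × Int)) (n : Int) : Nat :=
  (dag_levels.map (fun p => p.1)).countP (fun m => pvLexlt (pvKey dag_levels m) (pvKey dag_levels n))
-- memo-free value function (the unique fixpoint both programs compute)
def pvS (dag : List (Int × List Int)) (dag_levels : List (Int × Int)) (layer1_to_cdbg : List (Int × List Int)) : Nat → Int → Int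
  | 0, _ => 0
  | f+1, n =>
    if (PySem.Dict.mk dag_levels).getD n 0 == 0 then
      (((PySem.Dict.mk layer1_to_cdbg).getD n []).length : Int)
    else
      ((PySem.Dict.mk dag).getD n []).foldl (fun s c => s + pvS dag dag_levels layer1_to_cdbg f c) 0
def pvV (dag : List (Int × List Int)) (dag_levels : List (Int × Int)) (layer1_to_cdbg : List (Int × List Int)) (n : Int) : Int :=
  pvS dag dag_levels layer1_to_cdbg (dag_levels.length + 1) n

theorem pvLexlt_irrefl (a : Int × Int) : pvLexlt a a = false := by
  simp [pvLexlt]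
theorem pvLexlt_trans {a b c : Int × Int} : pvLexlt a b = true → pvLexlt b c = true → pvLexlt a c = true := by
  simp only [pvLexlt, Bool.or_eq_true, Bool.and_eq_true, decide_eq_true_eq, beq_iff_eq]
  omega
theorem pvLex_asymm {a b : Int × Int} : pvLexlt a b = true → pvLexle b a = true → False := by
  simp only [pvLexlt, pvLexle, Bool.or_eq_true, Bool.and_eq_true, decide_eq_true_eq, beq_iff_eq]
  omega

-- sorted2 commutes with map (no hypotheses: the comparisons are literally the same booleans)
theorem insertBy_map {α β : Type} (f : α → β) (before : β → β → Bool) (x : α) (ys : List α) :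
    PySem.List.insertBy before (f x) (ys.map f)
      = (PySem.List.insertBy (fun a b => before (f a) (f b)) x ys).map f := by
  induction ys with
  | nil => rfl
  | cons y t ih =>
    simp only [List.map_cons, PySem.List.insertBy]
    by_cases h : before (f x) (f y) = true
    · simp [h]
    · simp [h, ih]
theorem sorted2_map {α β κ₁ κ₂ : Type} [LT κ₁] [DecidableLT κ₁] [LT κ₂] [DecidableLT κ₂]
    (f : α → β) (k1 : β → κ₁) (k2 : β → κ₂) (ys : List α) :
    PySem.List.sorted2 (ys.map f) k1 k2
      = (PySem.List.sorted2 ys (fun a => k1 (f a)) (fun a => k2 (f a))).map f := by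
  show List.foldl _ _ _ = List.map f (List.foldl _ _ _)
  rw [show ([] : List β) = List.map f [] from rfl]
  generalize ([] : List α) = acc
  induction ys generalizing acc with
  | nil => rfl
  | cons y t ih =>
    simp only [List.map_cons, List.foldl_cons]
    rw [insertBy_map f _ y acc]
    exact ih _

theorem mem_insertBy' {α : Type} (before : α → α → Bool) (x z : α) (ys : List α)
    (hz : z ∈ PySem.List.insertBy before x ys) : z = x ∨ z ∈ ys := by
  induction ys with
  | nil => simpa [PySem.List.insertBy] using hz
  | cons y t ih =>
    simp only [PySem.List.insertBy] at hz
    by_cases h : before x y = true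
    · simp [h] at hz
      rcases hz with h' | h' | h'
      · exact Or.inl h'
      · exact Or.inr (by simp [h'])
      · exact Or.inr (by simp [h'])
    · simp [h] at hz
      rcases hz with h' | h'
      · exact Or.inr (by simp [h'])
      · rcases ih h' with h'' | h''
        · exact Or.inl h''
        · exact Or.inr (by simp [h''])

theorem pairwise_insertBy {α : Type} (R : α → α → Prop) (before : α → α → Bool)
    (h1 : ∀ a b, before a b = true → R a b) (h2 : ∀ a b, before a b = false → R b a)
    (ht : ∀ {a b c}, R a b → R b c → R a c) (x : α) (ys : List α)
    (h : ys.Pairwise R) : (PySem.List.insertBy before x ys).Pairwise R := by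
  induction ys with
  | nil => simp [PySem.List.insertBy]
  | cons y t ih =>
    rcases List.pairwise_cons.mp h with ⟨hyt, hpt⟩
    simp only [PySem.List.insertBy]
    by_cases hb : before x y = true
    · simp only [hb, if_true]
      refine List.pairwise_cons.mpr ⟨?_, h⟩
      intro z hz
      rcases List.mem_cons.mp hz with rfl | hz
      · exact h1 _ _ hb
      · exact ht (h1 _ _ hb) (hyt _ hz)
    · simp only [hb]
      refine List.pairwise_cons.mpr ⟨?_, ih hpt⟩
      intro z hz
      rcases mem_insertBy' _ _ _ _ hz with rfl | hz
      · exact h2 _ _ (by simpa using hb)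
      · exact hyt _ hz
-- A's sorted list is pairwise pvLexle
theorem sorted2_pairwise_lexle (xs : List (Int × Int)) :
    (PySem.List.sorted2 xs (fun t => t.1) (fun t => t.2)).Pairwise (fun a b => pvLexle a b = true) := by
  unfold PySem.List.sorted2
  simp only []
  have h : ∀ (acc : List (Int × Int)), acc.Pairwise (fun a b => pvLexle a b = true) →
      (xs.foldl (fun acc x => PySem.List.insertBy
        (fun a b => decide (a.1 < b.1) || !decide (b.1 < a.1) && decide (a.2 < b.2)) x acc) acc).Pairwise
        (fun a b => pvLexle a b = true) := by
    induction xs with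
    | nil => intro acc h; exact h
    | cons x t ih =>
      intro acc h
      refine ih _ (pairwise_insertBy _ _ ?_ ?_ ?_ _ _ h)
      · intro a b hab
        simp only [pvLexle, Bool.or_eq_true, Bool.and_eq_true, Bool.not_eq_eq_eq_not,
          Bool.not_true, decide_eq_true_eq, decide_eq_false_iff_not, beq_iff_eq] at hab ⊢
        omega
      · intro a b hab
        simp at hab
        simp only [pvLexle, Bool.or_eq_true, Bool.and_eq_true, decide_eq_true_eq, beq_iff_eq]
        omega
      · intro a b c hab hbc
        simp only [pvLexle, Bool.or_eq_true, Bool.and_eq_true, decide_eq_true_eq, beq_iff_eq] at hab hbc ⊢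
        omega
  exact h [] List.Pairwise.nil

theorem getD_mk_of_mem {dag_levels : List (Int × Int)} {p : Int × Int}
    (hnd : (dag_levels.map (fun q => q.1)).Nodup) (hp : p ∈ dag_levels) (d0 : Int) :
    (PySem.Dict.mk dag_levels).getD p.1 d0 = p.2 := by
  refine PySem.Dict.getD_of_mem_items (PySem.Dict.mk dag_levels) ?_ ?_ d0
  · show (p.1, p.2) ∈ dag_levels
    simpa using hp
  · simpa [PySem.Dict.keys_mk] using hnd

theorem countP_lt_countP {α : Type} (p q : α → Bool) (l : List α) (c : α) (hc : c ∈ l)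
    (himp : ∀ x ∈ l, p x = true → q x = true) (hqc : q c = true) (hpc : p c = false) :
    l.countP p < l.countP q := by
  induction l with
  | nil => cases hc
  | cons a t ih =>
    rw [List.countP_cons, List.countP_cons]
    rcases List.mem_cons.mp hc with rfl | hct
    · have hle : t.countP p ≤ t.countP q :=
        List.countP_mono_left (fun x hx => himp x (List.mem_cons_of_mem _ hx))
      simp [hpc, hqc]; omega
    · have := ih hct (fun x hx => himp x (List.mem_cons_of_mem _ hx))
      have ha : p a = true → q a = true := himp a (List.mem_cons_self ..)
      by_cases hpa : p a = true
      · simp [hpa, ha hpa]; omega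
      · simp only [Bool.not_eq_true] at hpa
        simp [hpa]; split <;> omega

theorem pvRank_le (dag_levels : List (Int × Int)) (n : Int) : pvRank dag_levels n ≤ dag_levels.length := by
  calc pvRank dag_levels n ≤ (dag_levels.map (fun p => p.1)).length := List.countP_le_length
    _ = dag_levels.length := List.length_map ..

theorem pvRank_lt {dag_levels : List (Int × Int)} {c n : Int}
    (hc : c ∈ dag_levels.map (fun p => p.1))
    (hlt : pvLexlt (pvKey dag_levels c) (pvKey dag_levels n) = true) :
    pvRank dag_levels c < pvRank dag_levels n := by
  refine countP_lt_countP _ _ _ c hc ?_ hlt ?_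
  · intro x _ hx
    exact pvLexlt_trans hx hlt
  · exact pvLexlt_irrefl _

-- every child of an in-dict non-level-0 node is in the dict with a strictly smaller key
theorem child_spec {dag : List (Int × List Int)} {dag_levels : List (Int × Int)} {layer1_to_cdbg : List (Int × List Int)}
    (hPre : Pre_calc_node_shadow_sizes dag dag_levels layer1_to_cdbg) {p : Int × Int} (hp : p ∈ dag_levels)
    (hp2 : p.2 ≠ 0) {c : Int} (hcmem : c ∈ (PySem.Dict.mk dag).getD p.1 []) :
    c ∈ dag_levels.map (fun q => q.1) ∧ pvLexlt (pvKey dag_levels c) (pvKey dag_levels p.1) = true := by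
  obtain ⟨hnd, hall⟩ := hPre
  obtain ⟨-, hch⟩ := hall p hp
  obtain ⟨r, hr, hrc, hord⟩ := (hch hp2).2 c hcmem
  have hkc : pvKey dag_levels c = (r.2, c) := by
    simp only [pvKey]
    rw [← hrc, getD_mk_of_mem hnd hr 0]
  have hkp : pvKey dag_levels p.1 = (p.2, p.1) := by
    simp only [pvKey]
    rw [getD_mk_of_mem hnd hp 0]
  constructor
  · exact List.mem_map.mpr ⟨r, hr, hrc⟩
  · rw [hkc, hkp]
    simp only [pvLexlt, Bool.or_eq_true, Bool.and_eq_true, decide_eq_true_eq, beq_iff_eq]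
    omega

theorem pvS_stable {dag : List (Int × List Int)} {dag_levels : List (Int × Int)} {layer1_to_cdbg : List (Int × List Int)}
    (hPre : Pre_calc_node_shadow_sizes dag dag_levels layer1_to_cdbg) :
    ∀ r n, n ∈ dag_levels.map (fun p => p.1) → pvRank dag_levels n = r →
      ∀ f g, r < f → r < g →
        pvS dag dag_levels layer1_to_cdbg f n = pvS dag dag_levels layer1_to_cdbg g n := by
  intro r
  induction r using Nat.strong_induction_on with
  | _ r ih =>
    intro n hn hr f g hf hg
    match f, g with
    | f'+1, g'+1 =>
      simp only [pvS]
      by_cases h0 : ((PySem.Dict.mk dag_levels).getD n 0 == 0) = true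
      · simp [h0]
      · simp only [h0, if_false, Bool.false_eq_true]
        obtain ⟨p, hp, hp1⟩ := List.mem_map.mp hn
        have hnd := hPre.1
        have hp2 : p.2 ≠ 0 := by
          intro hz
          apply h0
          rw [← hp1, getD_mk_of_mem hnd hp 0, hz]
          rfl
        refine PySem.List.foldl_congr_mem _ _ _ _ ?_
        intro acc c hc
        have hcs := child_spec hPre hp hp2 (by rwa [hp1])
        have hrlt : pvRank dag_levels c < r := by
          rw [← hr, ← hp1]
          exact pvRank_lt hcs.1 hcs.2
        rw [ih _ hrlt c hcs.1 rfl f' g' (by omega) (by omega)]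

theorem pvV_unfold {dag : List (Int × List Int)} {dag_levels : List (Int × Int)} {layer1_to_cdbg : List (Int × List Int)}
    (hPre : Pre_calc_node_shadow_sizes dag dag_levels layer1_to_cdbg) {p : Int × Int} (hp : p ∈ dag_levels) :
    pvV dag dag_levels layer1_to_cdbg p.1 =
      if p.2 == 0 then (((PySem.Dict.mk layer1_to_cdbg).getD p.1 []).length : Int)
      else ((PySem.Dict.mk dag).getD p.1 []).foldl (fun s c => s + pvV dag dag_levels layer1_to_cdbg c) 0 := by
  have hnd := hPre.1
  have hmem : p.1 ∈ dag_levels.map (fun q => q.1) := List.mem_map.mpr ⟨p, hp, rfl⟩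
  have hgd : (PySem.Dict.mk dag_levels).getD p.1 0 = p.2 := getD_mk_of_mem hnd hp 0
  show pvS dag dag_levels layer1_to_cdbg (dag_levels.length + 1) p.1 = _
  simp only [pvS, hgd]
  by_cases h0 : (p.2 == 0) = true
  · simp [h0]
  · simp only [h0, if_false, Bool.false_eq_true]
    refine PySem.List.foldl_congr_mem _ _ _ _ ?_
    intro acc c hc
    have hp2 : p.2 ≠ 0 := by simpa using h0
    have hcs := child_spec hPre hp hp2 hc
    have hrc : pvRank dag_levels c < dag_levels.length := by
      have h1 := pvRank_lt hcs.1 hcs.2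
      have h2 := pvRank_le dag_levels p.1
      omega
    rw [pvS_stable hPre (pvRank dag_levels c) c hcs.1 rfl dag_levels.length (dag_levels.length + 1)
      hrc (by omega)]
    rfl

-- memo invariant for B: every memoised entry carries the node's true shadow value
def pvGood (dag : List (Int × List Int)) (dag_levels : List (Int × Int)) (layer1_to_cdbg : List (Int × List Int)) (memo : PySem.Dict Int Int) : Prop :=
  ∀ q ∈ memo.items, q.2 = pvV dag dag_levels layer1_to_cdbg q.1

theorem shadow_ok {dag : List (Int × List Int)} {dag_levels : List (Int × Int)} {layer1_to_cdbg : List (Int × List Int)}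
    (hPre : Pre_calc_node_shadow_sizes dag dag_levels layer1_to_cdbg) :
    ∀ fuel n memo, n ∈ dag_levels.map (fun p => p.1) → pvGood dag dag_levels layer1_to_cdbg memo →
      pvRank dag_levels n < fuel →
      (pvShadow dag dag_levels layer1_to_cdbg fuel memo n).1 = pvV dag dag_levels layer1_to_cdbg n ∧
      pvGood dag dag_levels layer1_to_cdbg (pvShadow dag dag_levels layer1_to_cdbg fuel memo n).2 := by
  intro fuel
  induction fuel with
  | zero => intro n memo _ _ h; omega
  | succ f ihf =>
    intro n memo hn hgood hrank
    obtain ⟨p, hp, hp1⟩ := List.mem_map.mp hn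
    subst hp1
    have hnd := hPre.1
    have hgd : (PySem.Dict.mk dag_levels).getD p.1 0 = p.2 := getD_mk_of_mem hnd hp 0
    simp only [pvShadow]
    cases hg : PySem.Dict.get? memo p.1 with
    | some v =>
      refine ⟨?_, hgood⟩
      exact hgood (p.1, v) (PySem.Dict.mem_items_of_get?_eq_some _ hg)
    | none =>
      by_cases h0 : ((PySem.Dict.mk dag_levels).getD p.1 0 == 0) = true
      · simp only [h0, if_true]
        have hv : pvV dag dag_levels layer1_to_cdbg p.1
            = (((PySem.Dict.mk layer1_to_cdbg).getD p.1 []).length : Int) := by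
          rw [pvV_unfold hPre hp]
          rw [hgd] at h0
          simp [h0]
        refine ⟨hv.symm, ?_⟩
        intro q hq
        rcases (PySem.Dict.mem_items_insert _ _ _ _).mp hq with rfl | ⟨hq', -⟩
        · exact hv.symm
        · exact hgood q hq'
      · simp only [h0, if_false, Bool.false_eq_true]
        have hp2 : p.2 ≠ 0 := by rw [hgd] at h0; simpa using h0
        have aux : ∀ cs : List Int,
            (∀ c ∈ cs, c ∈ dag_levels.map (fun q => q.1) ∧ pvRank dag_levels c < f) →
            ∀ acc : Int × PySem.Dict Int Int, pvGood dag dag_levels layer1_to_cdbg acc.2 →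
            (cs.foldl (fun (acc : Int × PySem.Dict Int Int) c =>
                let rc := pvShadow dag dag_levels layer1_to_cdbg f acc.2 c
                (acc.1 + rc.1, rc.2)) acc).1
              = cs.foldl (fun s c => s + pvV dag dag_levels layer1_to_cdbg c) acc.1 ∧
            pvGood dag dag_levels layer1_to_cdbg
              (cs.foldl (fun (acc : Int × PySem.Dict Int Int) c =>
                let rc := pvShadow dag dag_levels layer1_to_cdbg f acc.2 c
                (acc.1 + rc.1, rc.2)) acc).2 := by
          intro cs
          induction cs with
          | nil => intro _ acc hacc; exact ⟨rfl, hacc⟩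
          | cons c t iht =>
            intro hcs acc hacc
            have hc := hcs c (List.mem_cons_self ..)
            have hrc := ihf c acc.2 hc.1 hacc hc.2
            simp only [List.foldl_cons]
            rw [show (pvShadow dag dag_levels layer1_to_cdbg f acc.2 c).1
              = pvV dag dag_levels layer1_to_cdbg c from hrc.1]
            exact iht (fun c' hc' => hcs c' (List.mem_cons_of_mem _ hc')) _ hrc.2
        have hchild : ∀ c ∈ (PySem.Dict.mk dag).getD p.1 [],
            c ∈ dag_levels.map (fun q => q.1) ∧ pvRank dag_levels c < f := by
          intro c hc
          have hcs := child_spec hPre hp hp2 hc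
          refine ⟨hcs.1, ?_⟩
          have h1 := pvRank_lt hcs.1 hcs.2
          omega
        have hr := aux _ hchild (0, memo) hgood
        have hv : pvV dag dag_levels layer1_to_cdbg p.1
            = ((PySem.Dict.mk dag).getD p.1 []).foldl
                (fun s c => s + pvV dag dag_levels layer1_to_cdbg c) 0 := by
          rw [pvV_unfold hPre hp]
          have : (p.2 == 0) = false := by simpa using hp2
          simp [this]
        refine ⟨?_, ?_⟩
        · rw [hr.1, ← hv]
        · intro q hq
          rcases (PySem.Dict.mem_items_insert _ _ _ _).mp hq with rfl | ⟨hq', -⟩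
          · simp only []
            rw [hr.1, ← hv]
          · exact hr.2 q hq'

theorem A_fold {dag : List (Int × List Int)} {dag_levels : List (Int × Int)} {layer1_to_cdbg : List (Int × List Int)}
    (hPre : Pre_calc_node_shadow_sizes dag dag_levels layer1_to_cdbg)
    (xs : List (Int × Int)) (hperm : xs.Perm (dag_levels.map (fun p => (p.2, p.1))))
    (hpw : xs.Pairwise (fun a b => pvLexle a b = true)) :
    ∀ ys zs, xs = ys ++ zs →
      (ys.foldl (fun (d : PySem.Dict Int Int) t =>
        if t.1 == 0 then
          d.insert t.2 (((PySem.Dict.mk layer1_to_cdbg).getD t.2 []).length : Int)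
        else
          d.insert t.2 (((PySem.Dict.mk dag).getD t.2 []).foldl (fun s c => s + d.getD c 0) 0))
        PySem.Dict.empty).items
      = ys.map (fun t => (t.2, pvV dag dag_levels layer1_to_cdbg t.2)) := by
  have hnd := hPre.1
  have hxsnodup : (xs.map (fun t => t.2)).Nodup := by
    refine ((hperm.map (fun t : Int × Int => t.2)).nodup_iff).mpr ?_
    rw [List.map_map]
    exact hnd
  intro ys
  induction ys using List.reverseRecOn with
  | nil => intro zs h; simp [PySem.Dict.empty]
  | append_singleton ys' t ih =>
    intro zs hxs
    have hxs' : xs = ys' ++ t :: zs := by simpa using hxs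
    have hd := ih (t :: zs) hxs'
    rw [List.foldl_append, List.foldl_cons, List.foldl_nil]
    have hkeys : (ys'.foldl (fun (d : PySem.Dict Int Int) t =>
        if t.1 == 0 then
          d.insert t.2 (((PySem.Dict.mk layer1_to_cdbg).getD t.2 []).length : Int)
        else
          d.insert t.2 (((PySem.Dict.mk dag).getD t.2 []).foldl (fun s c => s + d.getD c 0) 0))
        PySem.Dict.empty).keys = ys'.map (fun t' => t'.2) := by
      simp only [PySem.Dict.keys, hd, List.map_map]
      rfl
    have h2 : (ys'.map (fun t' => t'.2) ++ (t.2 :: zs.map (fun t' => t'.2))).Nodup := by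
      rw [hxs'] at hxsnodup
      simpa using hxsnodup
    rcases List.nodup_append.mp h2 with ⟨hn1, hn2, hdisj⟩
    have hfresh : t.2 ∉ ys'.map (fun t' => t'.2) := by
      intro hmem
      exact hdisj _ hmem _ (List.mem_cons_self ..) rfl
    have hcont : (ys'.foldl (fun (d : PySem.Dict Int Int) t =>
        if t.1 == 0 then
          d.insert t.2 (((PySem.Dict.mk layer1_to_cdbg).getD t.2 []).length : Int)
        else
          d.insert t.2 (((PySem.Dict.mk dag).getD t.2 []).foldl (fun s c => s + d.getD c 0) 0))
        PySem.Dict.empty).contains t.2 = false := by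
      rw [PySem.Dict.contains_eq_decide_mem_keys, hkeys]
      simpa using hfresh
    have htxs : t ∈ xs := by rw [hxs']; simp
    have htdl : (t.2, t.1) ∈ dag_levels := by
      have := hperm.subset htxs
      obtain ⟨p, hp, heq⟩ := List.mem_map.mp this
      have h1 : p.1 = t.2 := by rw [← heq]
      have h2' : p.2 = t.1 := by rw [← heq]
      rw [← h1, ← h2']
      simpa using hp
    have hV := pvV_unfold hPre htdl
    by_cases h0 : (t.1 == 0) = true
    · rw [if_pos h0, PySem.Dict.items_insert_of_not_contains _ _ hcont, hd]
      have hv : pvV dag dag_levels layer1_to_cdbg t.2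
          = (((PySem.Dict.mk layer1_to_cdbg).getD t.2 []).length : Int) := by
        rw [hV]; simp [h0]
      rw [List.map_append]
      simp [hv]
    · rw [if_neg (by simpa using h0), PySem.Dict.items_insert_of_not_contains _ _ hcont, hd]
      have ht1 : t.1 ≠ 0 := by simpa using h0
      have hval : ((PySem.Dict.mk dag).getD t.2 []).foldl
          (fun s c => s + (ys'.foldl (fun (d : PySem.Dict Int Int) t =>
            if t.1 == 0 then
              d.insert t.2 (((PySem.Dict.mk layer1_to_cdbg).getD t.2 []).length : Int)
            else
              d.insert t.2 (((PySem.Dict.mk dag).getD t.2 []).foldl (fun s c => s + d.getD c 0) 0))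
            PySem.Dict.empty).getD c 0) 0
          = pvV dag dag_levels layer1_to_cdbg t.2 := by
      -- each child's value is already in the dict built from ys'
        rw [hV, if_neg (by simpa using h0)]
        refine PySem.List.foldl_congr_mem _ _ _ _ ?_
        intro acc c hc
        have hcs := child_spec hPre htdl ht1 hc
        obtain ⟨r, hr, hrc⟩ := List.mem_map.mp hcs.1
        have hkc : pvKey dag_levels c = (r.2, c) := by
          simp only [pvKey]
          rw [← hrc, getD_mk_of_mem hnd hr 0]
        have hkt : pvKey dag_levels t.2 = t := by
          simp only [pvKey]
          rw [getD_mk_of_mem hnd htdl 0]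
        have hlt : pvLexlt (r.2, c) t = true := by
          rw [← hkc, ← hkt]
          exact hcs.2
        have hrxs : (r.2, c) ∈ xs := by
          refine hperm.mem_iff.mpr ?_
          refine List.mem_map.mpr ⟨r, hr, ?_⟩
          rw [hrc]
        rw [hxs'] at hrxs
        have hrys : (r.2, c) ∈ ys' := by
          rcases List.mem_append.mp hrxs with h | h
          · exact h
          · exfalso
            rcases List.mem_cons.mp h with heq | hz
            · rw [heq] at hlt
              rw [pvLexlt_irrefl] at hlt
              exact Bool.false_ne_true hlt
            · have hple : pvLexle t (r.2, c) = true := by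
                rw [hxs'] at hpw
                rcases (List.pairwise_append.mp hpw) with ⟨-, hmid, -⟩
                exact (List.pairwise_cons.mp hmid).1 _ hz
              exact pvLex_asymm hlt hple
        have hmemit : (c, pvV dag dag_levels layer1_to_cdbg c) ∈
            ys'.map (fun t => (t.2, pvV dag dag_levels layer1_to_cdbg t.2)) :=
          List.mem_map.mpr ⟨(r.2, c), hrys, rfl⟩
        rw [PySem.Dict.getD_of_mem_items _ (hd ▸ hmemit) (by rw [hkeys]; exact hn1) 0]
      rw [hval, List.map_append]
      simp

theorem B_fold {dag : List (Int × List Int)} {dag_levels : List (Int × Int)} {layer1_to_cdbg : List (Int × List Int)}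
    (hPre : Pre_calc_node_shadow_sizes dag dag_levels layer1_to_cdbg)
    (ks : List Int) (hperm : ks.Perm (dag_levels.map (fun p => p.1))) :
    ∀ ys zs, ks = ys ++ zs →
      pvGood dag dag_levels layer1_to_cdbg
        (ys.foldl (fun (st : PySem.Dict Int Int × PySem.Dict Int Int) n =>
          let rc := pvShadow dag dag_levels layer1_to_cdbg (dag_levels.length + 1) st.2 n
          (st.1.insert n rc.1, rc.2)) (PySem.Dict.empty, PySem.Dict.empty)).2 ∧
      (ys.foldl (fun (st : PySem.Dict Int Int × PySem.Dict Int Int) n =>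
          let rc := pvShadow dag dag_levels layer1_to_cdbg (dag_levels.length + 1) st.2 n
          (st.1.insert n rc.1, rc.2)) (PySem.Dict.empty, PySem.Dict.empty)).1.items
        = ys.map (fun n => (n, pvV dag dag_levels layer1_to_cdbg n)) := by
  have hnd := hPre.1
  have hksnodup : ks.Nodup := (hperm.nodup_iff).mpr hnd
  intro ys
  induction ys using List.reverseRecOn with
  | nil =>
    intro zs h
    refine ⟨?_, by simp [PySem.Dict.empty]⟩
    intro q hq
    simp [PySem.Dict.empty] at hq
  | append_singleton ys' n ih =>
    intro zs hks
    have hks' : ks = ys' ++ n :: zs := by simpa using hks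
    obtain ⟨hgood, hitems⟩ := ih (n :: zs) hks'
    rw [List.foldl_append, List.foldl_cons, List.foldl_nil]
    have hn : n ∈ dag_levels.map (fun p => p.1) := hperm.subset (by rw [hks']; simp)
    have hrk : pvRank dag_levels n < dag_levels.length + 1 := by
      have := pvRank_le dag_levels n
      omega
    have hsh := shadow_ok hPre (dag_levels.length + 1) n _ hn hgood hrk
    have hfresh : n ∉ ys' := by
      rw [hks'] at hksnodup
      rcases List.nodup_append.mp hksnodup with ⟨-, -, hdisj⟩
      intro hmem
      exact hdisj _ hmem _ (List.mem_cons_self ..) rfl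
    have hcont : ((ys'.foldl (fun (st : PySem.Dict Int Int × PySem.Dict Int Int) n =>
        let rc := pvShadow dag dag_levels layer1_to_cdbg (dag_levels.length + 1) st.2 n
        (st.1.insert n rc.1, rc.2)) (PySem.Dict.empty, PySem.Dict.empty)).1).contains n = false := by
      rw [PySem.Dict.contains_eq_decide_mem_keys]
      simp only [PySem.Dict.keys, hitems, List.map_map]
      simpa using hfresh
    refine ⟨hsh.2, ?_⟩
    simp only []
    rw [PySem.Dict.items_insert_of_not_contains _ _ hcont, hitems, hsh.1, List.map_append]
    simp

theorem ks_eq (dag_levels : List (Int × Int)) (hnd : (dag_levels.map (fun p => p.1)).Nodup) :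
    PySem.List.sorted2 (dag_levels.map (fun p => p.1))
        (fun n => (PySem.Dict.mk dag_levels).getD n 0) (fun n => n)
      = (PySem.List.sorted2 (dag_levels.map (fun p => (p.2, p.1)))
          (fun t => t.1) (fun t => t.2)).map (fun t => t.2) := by
  have h1 : dag_levels.map (fun p => ((p.2 : Int), (p.1 : Int)))
      = (dag_levels.map (fun p => p.1)).map (fun n => ((PySem.Dict.mk dag_levels).getD n 0, n)) := by
    rw [List.map_map]
    refine List.map_congr_left ?_
    intro p hp
    simp only [Function.comp]
    rw [getD_mk_of_mem hnd hp 0]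
  rw [h1, sorted2_map (fun n => ((PySem.Dict.mk dag_levels).getD n 0, n)) (fun t => t.1) (fun t => t.2)]
  rw [List.map_map]
  exact (List.map_id' _).symm

-- ===== VERDICT (by name: the statement is the Claim_ definition above) =====
theorem calc_node_shadow_sizes_spec : Claim_equal_calc_node_shadow_sizes := by
  intro dag dag_levels layer1_to_cdbg _hDom hPre
  unfold Spec_calc_node_shadow_sizes
  have hnd := hPre.1
  have hperm := PySem.List.sorted2_perm (dag_levels.map (fun p => (p.2, p.1)))
    (fun t => t.1) (fun t => t.2) false
  have hpw := sorted2_pairwise_lexle (dag_levels.map (fun p => (p.2, p.1)))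
  have hA := A_fold hPre _ hperm hpw
    (PySem.List.sorted2 (dag_levels.map (fun p => (p.2, p.1))) (fun t => t.1) (fun t => t.2)) []
    (by simp)
  have hkperm : (PySem.List.sorted2 (dag_levels.map (fun p => p.1))
      (fun n => (PySem.Dict.mk dag_levels).getD n 0) (fun n => n)).Perm
      (dag_levels.map (fun p => p.1)) :=
    PySem.List.sorted2_perm _ _ _ false
  have hB := B_fold hPre _ hkperm
    (PySem.List.sorted2 (dag_levels.map (fun p => p.1))
      (fun n => (PySem.Dict.mk dag_levels).getD n 0) (fun n => n)) []
    (by simp)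
  simp only [calc_node_shadow_sizes, calc_node_shadow_sizes_alt]
  rw [hA, hB.2, ks_eq dag_levels hnd, List.map_map]
  rfl
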